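-- pv_equiv track=rewrite | github.com/servicedyno/Nomadly-EMAIL-IVR | scripts/apply_i18n_v2.py | find_template_literal_end
-- ===== SOURCE A (Python) =====
-- def find_template_literal_end(text, start):
--     """Find the end of a template literal starting at `start` (which is the opening backtick)."""
--     i = start + 1  # skip opening backtick
--     depth = 0
--     while i < len(text):
--         c = text[i]
--         if c == '\\':
--             i += 2  # skip escaped char
--             continue
--         if depth == 0 and c == '`':
--             return i  # found closing backtick
--         if c == '$' and i + 1 < len(text) and text[i + 1] == '{':
--             depth += 1
--             i += 2
--             continue
--         if c == '}' and depth > 0: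
--             depth -= 1
--             i += 1
--             continue
--         # Handle nested template literals inside ${}
--         if depth > 0 and c == '`':
--             nested_end = find_template_literal_end(text, i)
--             if nested_end is not None:
--                 i = nested_end + 1
--                 continue
--         i += 1
--     return None
-- ===== SOURCE B (Python) =====
-- def find_template_literal_end(text, start):
--     """Find the end of a template literal starting at `start` (which is the opening backtick)."""
--     i = start + 1
--     stack = [0]  # one ${-nesting depth per currently open template literal
--     n = len(text)
--     while i < n:
--         c = text[i]
--         if c == '\\':
--             i += 2
--             continue
--         if stack[-1] == 0 and c == '`':
--             stack.pop()
--             if not stack: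
--                 return i
--             i += 1
--             continue
--         if c == '$' and i + 1 < n and text[i + 1] == '{':
--             stack[-1] += 1
--             i += 2
--             continue
--         if c == '}' and stack[-1] > 0:
--             stack[-1] -= 1
--             i += 1
--             continue
--         if stack[-1] > 0 and c == '`':
--             stack.append(0)
--         i += 1
--     return None
-- ===== Notes on version B (the rewrite author's own statement) =====
-- stated objective: alternative
-- what changed: Replaces A's recursion into nested template literals (which re-scans the tail when a nested scan fails) by a single left-to-right pass maintaining an explicit stack of ${-nesting depths, one entry per open template literal.
import Mathlib
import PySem

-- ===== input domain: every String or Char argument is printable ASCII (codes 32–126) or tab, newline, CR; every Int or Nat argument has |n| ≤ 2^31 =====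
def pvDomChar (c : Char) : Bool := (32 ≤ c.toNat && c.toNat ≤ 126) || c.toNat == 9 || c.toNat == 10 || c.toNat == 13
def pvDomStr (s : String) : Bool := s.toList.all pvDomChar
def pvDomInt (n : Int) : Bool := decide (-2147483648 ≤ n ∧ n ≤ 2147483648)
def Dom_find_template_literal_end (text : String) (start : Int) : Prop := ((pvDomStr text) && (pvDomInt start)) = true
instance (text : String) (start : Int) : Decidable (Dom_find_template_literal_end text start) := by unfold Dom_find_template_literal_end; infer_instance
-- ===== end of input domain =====

-- B replaces A's recursion into nested template literals by a single left-to-right pass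
-- maintaining an explicit stack of ${-nesting depths (one entry per open template literal).

-- ===== PORT A =====
-- weakening helper: the loop's result index only grows, recorded in a subtype for termination
def pvWk {i j : Int} (h : i ≤ j) (o : Option {e : Int // j ≤ e}) : Option {e : Int // i ≤ e} :=
  o.map (fun x => ⟨x.1, le_trans h x.2⟩)

-- A's while loop; `d` is `depth`; the recursive call `find_template_literal_end(text, i)`
-- is `pvLoopA cs (i+1) 0` (A's body with start := i).  On `pyGet? = none` Python raises
-- IndexError (outside Pre_); the port returns none there.
def pvLoopA (cs : List Char) (i : Int) (d : Nat) : Option {e : Int // i ≤ e} :=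
  if h : i < (cs.length : Int) then
    match PySem.List.pyGet? cs i with
    | none => none
    | some c =>
      if c = '\\' then pvWk (by omega) (pvLoopA cs (i + 2) d)
      else if d = 0 ∧ c = '`' then some ⟨i, le_refl i⟩
      else if c = '$' ∧ i + 1 < (cs.length : Int) ∧ PySem.List.pyGet? cs (i + 1) = some '{' then
        pvWk (by omega) (pvLoopA cs (i + 2) (d + 1))
      else if c = '}' ∧ 0 < d then pvWk (by omega) (pvLoopA cs (i + 1) (d - 1))
      else if 0 < d ∧ c = '`' then
        match pvLoopA cs (i + 1) 0 with
        | some ⟨ev, he⟩ => pvWk (by omega) (pvLoopA cs (ev + 1) d)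
        | none => pvWk (by omega) (pvLoopA cs (i + 1) d)
      else pvWk (by omega) (pvLoopA cs (i + 1) d)
  else none
termination_by ((cs.length : Int) - i).toNat
decreasing_by all_goals omega

def find_template_literal_end (text : String) (start : Int) : Option Int :=
  (pvLoopA text.toList (start + 1) 0).map Subtype.val

-- ===== PORT B =====
-- B's while loop; the stack `[s0, …, top]` is represented as `top` plus `rest`
-- (head of `rest` = next entry below the top).
def pvLoopB (cs : List Char) (i : Int) (top : Nat) (rest : List Nat) : Option Int :=
  if h : i < (cs.length : Int) then
    match PySem.List.pyGet? cs i with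
    | none => none
    | some c =>
      if c = '\\' then pvLoopB cs (i + 2) top rest
      else if top = 0 ∧ c = '`' then
        match rest with
        | [] => some i
        | t :: r => pvLoopB cs (i + 1) t r
      else if c = '$' ∧ i + 1 < (cs.length : Int) ∧ PySem.List.pyGet? cs (i + 1) = some '{' then
        pvLoopB cs (i + 2) (top + 1) rest
      else if c = '}' ∧ 0 < top then pvLoopB cs (i + 1) (top - 1) rest
      else if 0 < top ∧ c = '`' then pvLoopB cs (i + 1) 0 (top :: rest)
      else pvLoopB cs (i + 1) top rest
  else none
termination_by ((cs.length : Int) - i).toNat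
decreasing_by all_goals omega

def find_template_literal_end_alt (text : String) (start : Int) : Option Int :=
  pvLoopB text.toList (start + 1) 0 []

-- ===== PRECONDITION & SPEC =====
-- Pre_ excludes exactly the inputs where Python raises IndexError: start+1 < -len(text)
-- (the first subscript text[start+1] is then out of range; both A and B raise there).
def Pre_find_template_literal_end (text : String) (start : Int) : Prop :=
  -(text.toList.length : Int) ≤ start + 1
instance (text : String) (start : Int) : Decidable (Pre_find_template_literal_end text start) := by
  unfold Pre_find_template_literal_end; infer_instance

def pvWitness_find_template_literal_end : String × Int := ("`a${b}`", 0)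

def Spec_find_template_literal_end (text : String) (start : Int) (out : Option Int) : Prop :=
  out = find_template_literal_end_alt text start
instance (text : String) (start : Int) (out : Option Int) : Decidable (Spec_find_template_literal_end text start out) := by
  unfold Spec_find_template_literal_end; infer_instance

-- ===== CLAIM (what is proved, stated in full; the proofs are below) =====
def Claim_equal_find_template_literal_end : Prop := ∀ (text : String) (start : Int), Dom_find_template_literal_end text start → Pre_find_template_literal_end text start → Spec_find_template_literal_end text start (find_template_literal_end text start)

-- ===== LEMMAS AND PROOFS =====

@[simp] theorem pvWk_none {i j : Int} (h : i ≤ j) (o : Option {e : Int // j ≤ e}) :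
    pvWk h o = none ↔ o = none := by
  cases o <;> simp [pvWk]

theorem pvA_none_mono (cs : List Char) (i : Int) (d d' : Nat) (hdd : d' ≤ d)
    (h0 : pvLoopA cs i d' = none) : pvLoopA cs i d = none := by
  rw [pvLoopA] at h0 ⊢
  by_cases hlt : i < (cs.length : Int)
  · simp only [dif_pos hlt] at h0 ⊢
    cases hg : PySem.List.pyGet? cs i with
    | none => simp [hg]
    | some c =>
      simp only [hg] at h0 ⊢
      by_cases hbs : c = '\\'
      · simp only [if_pos hbs, pvWk_none] at h0 ⊢
        exact pvA_none_mono cs (i + 2) d d' hdd h0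
      · simp only [if_neg hbs] at h0 ⊢
        by_cases hbt : c = '`'
        · by_cases hd' : d' = 0
          · simp [hd', hbt] at h0
          · have hd : ¬ d = 0 := by omega
            have hne : ¬ (c = '$' ∧ i + 1 < (cs.length : Int) ∧ PySem.List.pyGet? cs (i + 1) = some '{') := by
              subst hbt; intro hx; exact absurd hx.1 (by decide)
            have hne2 : ¬ (c = '}' ∧ 0 < d') := by
              subst hbt; intro hx; exact absurd hx.1 (by decide)
            have hne2' : ¬ (c = '}' ∧ 0 < d) := by
              subst hbt; intro hx; exact absurd hx.1 (by decide)
            simp only [if_neg (fun hx : d' = 0 ∧ c = '`' => hd' hx.1), if_neg (fun hx : d = 0 ∧ c = '`' => hd hx.1), if_neg hne,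
              if_neg hne2, if_neg hne2', if_pos (⟨by omega, hbt⟩ : 0 < d' ∧ c = '`'),
              if_pos (⟨by omega, hbt⟩ : 0 < d ∧ c = '`')] at h0 ⊢
            cases hnest : pvLoopA cs (i + 1) 0 with
            | some ev =>
              obtain ⟨ev, he⟩ := ev
              simp only [hnest, pvWk_none] at h0 ⊢
              exact pvA_none_mono cs (ev + 1) d d' hdd h0
            | none =>
              simp only [hnest, pvWk_none] at h0 ⊢
              exact pvA_none_mono cs (i + 1) d d' hdd h0
        · have hne1 : ¬ (d' = 0 ∧ c = '`') := fun hx => hbt hx.2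
          have hne1' : ¬ (d = 0 ∧ c = '`') := fun hx => hbt hx.2
          have hne5 : ¬ (0 < d' ∧ c = '`') := fun hx => hbt hx.2
          have hne5' : ¬ (0 < d ∧ c = '`') := fun hx => hbt hx.2
          simp only [if_neg hne1, if_neg hne1'] at h0 ⊢
          by_cases hS : c = '$' ∧ i + 1 < (cs.length : Int) ∧ PySem.List.pyGet? cs (i + 1) = some '{'
          · simp only [if_pos hS, pvWk_none] at h0 ⊢
            exact pvA_none_mono cs (i + 2) (d + 1) (d' + 1) (by omega) h0
          · simp only [if_neg hS] at h0 ⊢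
            by_cases hcr : c = '}'
            · by_cases hd'0 : 0 < d'
              · simp only [if_pos (⟨hcr, hd'0⟩ : c = '}' ∧ 0 < d'),
                  if_pos (⟨hcr, by omega⟩ : c = '}' ∧ 0 < d), pvWk_none] at h0 ⊢
                exact pvA_none_mono cs (i + 1) (d - 1) (d' - 1) (by omega) h0
              · simp only [if_neg (fun hx : c = '}' ∧ 0 < d' => hd'0 hx.2),
                  if_neg hne5] at h0
                by_cases hd0 : 0 < d
                · simp only [if_pos (⟨hcr, hd0⟩ : c = '}' ∧ 0 < d), pvWk_none] at h0 ⊢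
                  exact pvA_none_mono cs (i + 1) (d - 1) d' (by omega) (by simpa using h0)
                · simp only [if_neg (fun hx : c = '}' ∧ 0 < d => hd0 hx.2),
                    if_neg hne5', pvWk_none] at h0 ⊢
                  exact pvA_none_mono cs (i + 1) d d' hdd (by simpa using h0)
            · have h3 : ¬ (c = '}' ∧ 0 < d') := fun hx => hcr hx.1
              have h3' : ¬ (c = '}' ∧ 0 < d) := fun hx => hcr hx.1
              simp only [if_neg h3, if_neg h3', if_neg hne5, if_neg hne5', pvWk_none] at h0 ⊢
              exact pvA_none_mono cs (i + 1) d d' hdd h0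
  · simp [dif_neg hlt]
termination_by ((cs.length : Int) - i).toNat
decreasing_by all_goals omega

theorem pvAB (cs : List Char) (i : Int) (d : Nat) (rest : List Nat) :
    pvLoopB cs i d rest =
      (match pvLoopA cs i d with
        | some e => (match rest with
          | [] => some e.1
          | t :: r => pvLoopB cs (e.1 + 1) t r)
        | none => none) := by
  rw [pvLoopB.eq_def, pvLoopA.eq_def]
  by_cases hlt : i < (cs.length : Int)
  · simp only [dif_pos hlt]
    cases hg : PySem.List.pyGet? cs i with
    | none => simp
    | some c =>
      by_cases hbs : c = '\\'
      · simp only [if_pos hbs]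
        rw [pvAB cs (i + 2) d rest]
        cases pvLoopA cs (i + 2) d <;> simp [pvWk]
      · simp only [if_neg hbs]
        by_cases hbt : c = '`'
        · by_cases hd0 : d = 0
          · cases rest <;> simp [hd0, hbt]
          · have hne : ¬ (c = '$' ∧ i + 1 < (cs.length : Int) ∧ PySem.List.pyGet? cs (i + 1) = some '{') := by
              subst hbt; intro hx; exact absurd hx.1 (by decide)
            have hne2 : ¬ (c = '}' ∧ 0 < d) := by
              subst hbt; intro hx; exact absurd hx.1 (by decide)
            simp only [if_neg (fun hx : d = 0 ∧ c = '`' => hd0 hx.1), if_neg hne, if_neg hne2,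
              if_pos (⟨by omega, hbt⟩ : 0 < d ∧ c = '`')]
            rw [pvAB cs (i + 1) 0 (d :: rest)]
            cases hnest : pvLoopA cs (i + 1) 0 with
            | some ev =>
              obtain ⟨ev, he⟩ := ev
              simp only []
              rw [pvAB cs (ev + 1) d rest]
              cases pvLoopA cs (ev + 1) d <;> simp [pvWk]
            | none =>
              have := pvA_none_mono cs (i + 1) d 0 (by omega) hnest
              simp [this, pvWk]
        · have hne1 : ¬ (d = 0 ∧ c = '`') := fun hx => hbt hx.2
          have hne5 : ¬ (0 < d ∧ c = '`') := fun hx => hbt hx.2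
          simp only [if_neg hne1]
          by_cases hS : c = '$' ∧ i + 1 < (cs.length : Int) ∧ PySem.List.pyGet? cs (i + 1) = some '{'
          · simp only [if_pos hS]
            rw [pvAB cs (i + 2) (d + 1) rest]
            cases pvLoopA cs (i + 2) (d + 1) <;> simp [pvWk]
          · simp only [if_neg hS]
            by_cases hR : c = '}' ∧ 0 < d
            · simp only [if_pos hR]
              rw [pvAB cs (i + 1) (d - 1) rest]
              cases pvLoopA cs (i + 1) (d - 1) <;> simp [pvWk]
            · simp only [if_neg hR, if_neg hne5]
              rw [pvAB cs (i + 1) d rest]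
              cases pvLoopA cs (i + 1) d <;> simp [pvWk]
  · simp [dif_neg hlt]
termination_by ((cs.length : Int) - i).toNat
decreasing_by all_goals omega

-- ===== VERDICT (by name: the statement is the Claim_ definition above) =====
theorem find_template_literal_end_spec : Claim_equal_find_template_literal_end := by
  intro text start _ _
  unfold Spec_find_template_literal_end find_template_literal_end find_template_literal_end_alt
  rw [pvAB text.toList (start + 1) 0 []]
  cases pvLoopA text.toList (start + 1) 0 <;> simp
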